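-- pv_equiv track=rewrite | github.com/Scope0204/Programmers_Practice | 2단계/문자열압축.py | solution
-- ===== SOURCE A (Python) =====
-- def solution(s):
--     answer = ['']*len(s)
--     n = 0
--
--     while n < len(s):
--         result = []
--         same = {}
--         count = 0
--         n += 1
--
--         for i in range(0, len(s), n):
--             if result and result[-1] == s[i:i+n]:  # result 의 마지막 값과 중복되는 경우
--                 if result[-1] not in same:
--                     count += 2
--                 else:
--                     count += 1
--                 same[result[-1]] = str(count)  # same 리스트에 count를 저장한다
--
--             else:  # 중복되지않는 경우
--                 count = 0  # 중복 카운터를 초기화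
--                 if same:  # 중복 리스트가 있는경우
--                     for v2 in same:
--                         result.append(same[v2])  # result에 중복됫 횟수를 저장
--
--                     result.append(s[i:i+n])  # result에 중복되지않은 현재 값을 저장
--
--                     same = {}  # 중복 리스트초기화
--                 else:
--                     result.append(s[i:i+n])  # 아닌경우도 동일
--
--         if same:
--             for v2 in same:
--                 result.append(same[v2])  # 마지막이라 남은 same도 result에 중복됫 횟수를 저장
--
--         answer[n-1] = len(''.join(result))
--         # n번째가 끝난 후 result의 값을 전부 합쳐서 저장
--
--     return min(answer)
-- ===== SOURCE B (Python) =====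
-- def solution(s):
--     L = len(s)
--     best = L  # any unit length n > L//2 compresses nothing: its total is always L
--     for n in range(1, L // 2 + 1):
--         chunks = [s[i:i+n] for i in range(0, L, n)]
--         m = len(chunks)
--         total = 0
--         j = 0
--         while j < m:
--             k = j + 1
--             while k < m and chunks[k] == chunks[j]:
--                 k += 1
--             run = k - j
--             total += len(chunks[j]) + (len(str(run)) if run > 1 else 0)
--             j = k
--         best = min(best, total)
--     return best
-- ===== Notes on version B (the rewrite author's own statement) =====
-- stated objective: alternative
-- what changed: Per unit length B materializes the chunk list and measures it with a two-pointer run-jumping index scan (the inner pointer jumps to the end of each run and chunk/digit lengths are summed arithmetically), instead of A's streaming pass that appends chunk strings to a result list, keeps a dict of count strings, flushes it on change and takes len(join); unit lengths above len(s)//2 are covered by the initial best=len(s).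
import Mathlib
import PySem

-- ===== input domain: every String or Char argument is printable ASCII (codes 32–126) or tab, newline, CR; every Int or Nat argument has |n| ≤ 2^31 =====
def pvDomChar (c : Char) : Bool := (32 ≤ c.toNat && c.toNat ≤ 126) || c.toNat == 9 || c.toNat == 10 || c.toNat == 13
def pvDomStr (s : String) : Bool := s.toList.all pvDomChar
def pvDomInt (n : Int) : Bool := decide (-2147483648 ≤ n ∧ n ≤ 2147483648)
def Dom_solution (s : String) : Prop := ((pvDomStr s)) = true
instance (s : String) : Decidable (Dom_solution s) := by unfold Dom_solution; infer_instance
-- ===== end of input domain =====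

-- B measures each unit length by a two-pointer run-jumping scan over a materialized chunk list
-- instead of A's streaming result-list/dict/join bookkeeping (objective: alternative).

-- ===== PORT A =====
-- one iteration of A's inner `for i in range(0, len(s), n)` loop, on state (result, same, count);
-- `chunk` is the already-sliced s[i:i+n]
def solutionStep (st : List (List Char) × PySem.Dict (List Char) (List Char) × Int)
    (chunk : List Char) : List (List Char) × PySem.Dict (List Char) (List Char) × Int :=
  match st with
  | (result, same, count) =>
    if result.getLast? = some chunk then          -- `if result and result[-1] == s[i:i+n]`
      let count' : Int := if !(same.contains chunk) then count + 2 else count + 1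
      (result, same.insert chunk (PySem.Int.toChars count'), count')
    else
      -- count = 0
      if same.size ≠ 0 then
        (result ++ same.values ++ [chunk], PySem.Dict.empty, (0 : Int))
      else
        (result ++ [chunk], same, (0 : Int))

-- the body of A's `while` loop for a given n: answer[n-1]
def solutionLenFor (cs : List Char) (n : Int) : Int :=
  let st := (PySem.List.pyRange 0 (cs.length : Int) n).foldl
      (fun st i => solutionStep st (PySem.List.slice cs (some i) (some (i + n)))) ([], PySem.Dict.empty, 0)
  let result := if st.2.1.size ≠ 0 then st.1 ++ st.2.1.values else st.1   -- trailing `if same:` flush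
  ((PySem.Chars.join [] result).length : Int)                             -- len(''.join(result))

-- answer = [solutionLenFor for n = 1 .. len(s)]; min(answer) raises ValueError only for s = "" (outside Pre_)
def solution (s : String) : Int :=
  (PySem.List.min?
    ((PySem.List.pyRange 1 ((s.toList.length : Int) + 1) 1).map (fun n => solutionLenFor s.toList n))
    (fun x => x)).getD 0

-- ===== PORT B =====
-- B's inner `while k < m and chunks[k] == chunks[j]: k += 1` (option equality: both indices are
-- in range whenever Python evaluates the comparison)
def countRunIdx (chunks : List (List Char)) (j k : Nat) : Nat :=
  if h : k < chunks.length ∧ chunks[k]? = chunks[j]? then countRunIdx chunks j (k + 1) else k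
termination_by chunks.length - k
decreasing_by omega

-- cited by sumRuns' decreasing_by (the pointer only moves forward)
lemma countRunIdx_ge (chunks : List (List Char)) (j k : Nat) : k ≤ countRunIdx chunks j k := by
  unfold countRunIdx
  split
  · exact Nat.le_trans (Nat.le_succ k) (countRunIdx_ge chunks j (k + 1))
  · exact Nat.le_refl k
termination_by chunks.length - k
decreasing_by omega

-- B's outer `while j < m` loop: total += len(chunks[j]) + (len(str(run)) if run > 1 else 0); j = k
def sumRuns (chunks : List (List Char)) (j : Nat) : Int :=
  if h : j < chunks.length then
    let k := countRunIdx chunks j (j + 1)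
    let run : Int := (k : Int) - (j : Int)
    ((chunks[j]'h).length : Int)
      + (if 1 < run then ((PySem.Int.toChars run).length : Int) else 0)
      + sumRuns chunks k
  else 0
termination_by chunks.length - j
decreasing_by have := countRunIdx_ge chunks j (j + 1); omega

-- best = len(s); for n in range(1, len(s)//2 + 1): chunks = [s[i:i+n] …]; best = min(best, total)
def solution_alt (s : String) : Int :=
  (PySem.List.pyRange 1 (PySem.Int.floordiv (s.toList.length : Int) 2 + 1) 1).foldl
    (fun best n =>
      min best (sumRuns
        ((PySem.List.pyRange 0 (s.toList.length : Int) n).map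
          (fun i => PySem.List.slice s.toList (some i) (some (i + n)))) 0))
    (s.toList.length : Int)

-- ===== PRECONDITION & SPEC =====
-- Pre_ excludes only the empty string, on which A raises ValueError (min of an empty list)
def Pre_solution (s : String) : Prop := s ≠ ""
instance (s : String) : Decidable (Pre_solution s) := by unfold Pre_solution; infer_instance
def pvWitness_solution : String := "aabbaccc"

def Spec_solution (s : String) (out : Int) : Prop := out = solution_alt s
instance (s : String) (out : Int) : Decidable (Spec_solution s out) := by unfold Spec_solution; infer_instance

-- ===== CLAIM (what is proved, stated in full; the proofs are below) =====
def Claim_equal_solution : Prop := ∀ (s : String), Dom_solution s → Pre_solution s → Spec_solution s (solution s)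

-- ===== LEMMAS AND PROOFS =====

-- proof-side canonical run-length fold both programs are reduced to
def unitLen (chunk : List Char) (run : Int) : Int :=
  (chunk.length : Int) + (if 1 < run then ((PySem.Int.toChars run).length : Int) else 0)

def pvRleStep (st : Int × Int × Option (List Char)) (c : List Char) :
    Int × Int × Option (List Char) :=
  match st with
  | (total, run, prev) =>
    if prev = some c then (total, run + 1, prev)
    else (total + (match prev with | some p => unitLen p run | none => 0), 1, some c)

def pvFinB (st : Int × Int × Option (List Char)) : Int :=
  st.1 + (match st.2.2 with | some p => unitLen p st.2.1 | none => 0)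

def pvRleVal (gs : List (List Char)) : Int := pvFinB (gs.foldl pvRleStep (0, 0, none))

def pvRleLenFor (cs : List Char) (n : Int) : Int :=
  pvFinB ((PySem.List.pyRange 0 (cs.length : Int) n).foldl
      (fun st i => pvRleStep st (PySem.List.slice cs (some i) (some (i + n)))) (0, 0, none))

-- chunk decomposition s[0:n], s[n:2n], …
def pvChunks (n : Nat) (l : List Char) : List (List Char) :=
  if h : l = [] ∨ n = 0 then [] else l.take n :: pvChunks n (l.drop n)
termination_by l.length
decreasing_by
  push Not at h
  have h1 : 0 < l.length := List.length_pos_iff.mpr h.1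
  simp only [List.length_drop]
  omega

-- A's `same` dict and `count` during a run of k copies of chunk c
def pvSameOf (c : List Char) (k : Nat) : PySem.Dict (List Char) (List Char) :=
  if 2 ≤ k then PySem.Dict.empty.insert c (PySem.Int.toChars (k : Int)) else PySem.Dict.empty

def pvCountOf (k : Nat) : Int := if 2 ≤ k then (k : Int) else 0

def pvFinA (st : List (List Char) × PySem.Dict (List Char) (List Char) × Int) : Int :=
  ((PySem.Chars.join [] (if st.2.1.size ≠ 0 then st.1 ++ st.2.1.values else st.1)).length : Int)

def pvLenSum (R : List (List Char)) : Int := ((R.map List.length).sum : Int)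

-- run-splitting view of a chunk list, used to relate B's pointer jumps to the RLE fold
def leadCount (c : List Char) : List (List Char) → Nat
  | [] => 0
  | g :: gs => if g = c then leadCount c gs + 1 else 0

def dropRun (c : List Char) : List (List Char) → List (List Char)
  | [] => []
  | g :: gs => if g = c then dropRun c gs else g :: gs

lemma pvRange_pos_cons {a b s : Int} (hs : 0 < s) (hab : a < b) :
    PySem.List.pyRange a b s = a :: PySem.List.pyRange (a + s) b s := by
  rw [PySem.List.pyRange_of_pos _ _ hs, PySem.List.pyRange_of_pos _ _ hs]
  have hdiv : (b - a + s - 1) / s = (b - a - 1) / s + 1 := by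
    have : b - a + s - 1 = (b - a - 1) + 1 * s := by ring
    rw [this, Int.add_mul_ediv_right _ _ hs.ne']
  have hnn : 0 ≤ (b - a - 1) / s := Int.ediv_nonneg (by omega) hs.le
  have hcount : ((b - a + s - 1) / s).toNat
      = (if a + s < b then ((b - (a + s) + s - 1) / s).toNat else 0) + 1 := by
    split
    · have : b - (a + s) + s - 1 = b - a - 1 := by ring
      rw [this, hdiv]; omega
    · have h0 : (b - a - 1) / s = 0 := Int.ediv_eq_zero_of_lt (by omega) (by omega)
      rw [hdiv, h0]; rfl
  rw [if_pos hab, hcount, List.range_succ_eq_map, List.map_cons, List.map_map]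
  simp only [Nat.cast_zero, mul_zero, add_zero]
  congr 1
  apply List.map_congr_left
  intro k _
  simp [Nat.succ_eq_add_one]
  ring

lemma pvRange_shift {a b s : Int} (hs : 0 < s) :
    PySem.List.pyRange (a + s) b s = (PySem.List.pyRange a (b - s) s).map (· + s) := by
  rw [PySem.List.pyRange_of_pos _ _ hs, PySem.List.pyRange_of_pos _ _ hs, List.map_map]
  have hc : (a + s < b) ↔ (a < b - s) := by omega
  have he : b - (a + s) + s - 1 = b - s - a + s - 1 := by ring
  rw [he]
  simp only [hc]
  exact List.map_congr_left (fun k _ => by simp; ring)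

lemma pvChunks_eq (n : Nat) (hn : 0 < n) (cs : List Char) :
    (PySem.List.pyRange 0 (cs.length : Int) (n : Int)).map
      (fun i => PySem.List.slice cs (some i) (some (i + (n : Int)))) = pvChunks n cs := by
  by_cases hcs : cs = []
  · subst hcs
    rw [pvChunks, dif_pos (Or.inl rfl)]
    simp [PySem.List.pyRange_of_pos _ _ (by exact_mod_cast hn : (0:Int) < n)]
  · have hL : 0 < cs.length := List.length_pos_iff.mpr hcs
    have hs : (0:Int) < (n:Int) := by exact_mod_cast hn
    rw [pvChunks, dif_neg (by simp [hcs, hn.ne'])]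
    rw [pvRange_pos_cons hs (by exact_mod_cast hL), List.map_cons]
    congr 1
    · have h0 : ((0:Int)) = ((0:Nat):Int) := rfl
      rw [h0, PySem.List.slice_natCast_add, List.drop_zero]
    · rw [pvRange_shift hs, List.map_map]
      by_cases hnl : n ≤ cs.length
      · have hdl : (((cs.drop n).length : Nat) : Int) = (cs.length : Int) - (n : Int) := by
          simp [List.length_drop]; omega
        have ih := pvChunks_eq n hn (cs.drop n)
        rw [hdl] at ih
        rw [← ih]
        apply List.map_congr_left
        intro i hi
        have hi0 : 0 ≤ i := ((PySem.List.mem_pyRange_iff_of_pos hs i).mp hi).1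
        simp only [Function.comp_apply]
        rw [PySem.List.slice_toNat _ (by omega) (by omega),
            PySem.List.slice_toNat _ (by omega) (by omega)]
        rw [List.drop_drop]
        congr 1
        · omega
        · congr 1
          omega
      · have hd : cs.drop n = [] := List.drop_eq_nil_of_le (by omega)
        rw [hd, pvChunks, dif_pos (Or.inl rfl)]
        have : (cs.length : Int) - (n : Int) ≤ 0 := by omega
        simp [PySem.List.pyRange_of_pos _ _ hs]
        omega
termination_by cs.length
decreasing_by simp [List.length_drop]; omega

lemma pvJoin_flatten (xs : List (List Char)) : PySem.Chars.join [] xs = xs.flatten := by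
  match xs with
  | [] => simp [PySem.Chars.join_nil]
  | [p] => simp [PySem.Chars.join_singleton]
  | p :: q :: rest =>
    rw [PySem.Chars.join_cons_cons, pvJoin_flatten (q :: rest)]
    simp

lemma pvJoin_len (xs : List (List Char)) : ((PySem.Chars.join [] xs).length : Int) = pvLenSum xs := by
  rw [pvJoin_flatten, pvLenSum]
  simp [List.length_flatten]

lemma pvSameOf_single (c : List Char) (k : Nat) (hk : 2 ≤ k) :
    pvSameOf c k = PySem.Dict.mk [(c, PySem.Int.toChars (k : Int))] := by
  simp [pvSameOf, hk, PySem.Dict.insert, PySem.Dict.contains, PySem.Dict.empty]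

lemma pvLenSum_concat (R : List (List Char)) (x : List Char) :
    pvLenSum (R ++ [x]) = pvLenSum R + (x.length : Int) := by
  simp [pvLenSum]

lemma pvDict_overwrite (c v w : List Char) :
    (PySem.Dict.mk [(c, v)]).insert c w = PySem.Dict.mk [(c, w)] := by
  simp [PySem.Dict.insert, PySem.Dict.contains]

-- A's fold from a mid-run state equals the RLE fold from the matching state
lemma pvRun_inv (gs : List (List Char)) :
    ∀ (R : List (List Char)) (c : List Char) (k : Nat) (t : Int), 1 ≤ k →
    R.getLast? = some c → pvLenSum R = t + (c.length : Int) →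
    pvFinA (gs.foldl solutionStep (R, pvSameOf c k, pvCountOf k)) =
      pvFinB (gs.foldl pvRleStep (t, (k : Int), some c)) := by
  induction gs with
  | nil =>
    intro R c k t hk hlast hsum
    simp only [List.foldl_nil, pvFinA, pvFinB]
    by_cases h2 : 2 ≤ k
    · have h1k : (1 : Int) < (k : Int) := by exact_mod_cast h2
      rw [pvSameOf_single c k h2]
      rw [if_pos (by simp [PySem.Dict.size])]
      have hv : (PySem.Dict.mk [(c, PySem.Int.toChars (k : Int))]).values
          = [PySem.Int.toChars (k : Int)] := by simp [PySem.Dict.values]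
      rw [pvJoin_len, hv, pvLenSum_concat, hsum]
      simp [unitLen, h1k]
      ring
    · have hk1 : k = 1 := by omega
      subst hk1
      simp only [pvSameOf, if_neg (by omega : ¬ (2:Nat) ≤ 1)]
      rw [if_neg (by simp [PySem.Dict.size, PySem.Dict.empty])]
      rw [pvJoin_len, hsum]
      simp [unitLen]
  | cons g gs ih =>
    intro R c k t hk hlast hsum
    rw [List.foldl_cons, List.foldl_cons]
    by_cases hg : g = c
    · subst hg
      by_cases h2 : 2 ≤ k
      · have hcont : (pvSameOf g k).contains g = true := by
          rw [pvSameOf_single g k h2]; simp [PySem.Dict.contains]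
        have hA : solutionStep (R, pvSameOf g k, pvCountOf k) g
            = (R, pvSameOf g (k + 1), pvCountOf (k + 1)) := by
          simp only [solutionStep, if_pos hlast, hcont, Bool.not_true, Bool.false_eq_true,
            if_false]
          rw [pvSameOf_single g k h2, pvSameOf_single g (k+1) (by omega), pvDict_overwrite]
          have hc : pvCountOf k = (k : Int) := by simp [pvCountOf, h2]
          have hc2 : pvCountOf (k + 1) = (k : Int) + 1 := by
            simp only [pvCountOf, if_pos (show 2 ≤ k + 1 by omega)]; push_cast; ring
          rw [hc, hc2]
          push_cast
          rfl
        have hB : pvRleStep (t, (k : Int), some g) g = (t, (k : Int) + 1, some g) := by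
          simp [pvRleStep]
        rw [hA, hB]
        have := ih R g (k + 1) t (by omega) hlast hsum
        push_cast at this
        exact this
      · have hk1 : k = 1 := by omega
        subst hk1
        have hcont : (pvSameOf g 1).contains g = false := by
          simp [pvSameOf, PySem.Dict.contains, PySem.Dict.empty]
        have hA : solutionStep (R, pvSameOf g 1, pvCountOf 1) g
            = (R, pvSameOf g 2, pvCountOf 2) := by
          simp only [solutionStep, if_pos hlast, hcont, Bool.not_false, if_true]
          have hc : pvCountOf 1 = 0 := by simp [pvCountOf]
          rw [hc, pvSameOf_single g 2 (by omega)]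
          simp only [pvSameOf, if_neg (by omega : ¬ (2:Nat) ≤ 1), pvCountOf]
          simp [PySem.Dict.insert, PySem.Dict.contains, PySem.Dict.empty]
        have hB : pvRleStep (t, ((1:Nat) : Int), some g) g
            = (t, ((2:Nat) : Int), some g) := by
          simp [pvRleStep]
        rw [hA, hB]
        exact ih R g 2 t (by omega) hlast hsum
    · have hne : ¬ (R.getLast? = some g) := by
        rw [hlast]; simp; exact fun h => hg h.symm
      have hB : pvRleStep (t, (k : Int), some c) g
          = (t + unitLen c (k : Int), 1, some g) := by
        simp only [pvRleStep]
        rw [if_neg (by simp; exact fun h => hg h.symm)]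
      by_cases h2 : 2 ≤ k
      · have h1k : (1 : Int) < (k : Int) := by exact_mod_cast h2
        have hA : solutionStep (R, pvSameOf c k, pvCountOf k) g
            = (R ++ [PySem.Int.toChars (k : Int)] ++ [g], pvSameOf g 1, pvCountOf 1) := by
          simp only [solutionStep, if_neg hne]
          rw [pvSameOf_single c k h2]
          rw [if_pos (by simp [PySem.Dict.size])]
          simp [PySem.Dict.values, pvSameOf, pvCountOf, PySem.Dict.empty]
        rw [hA, hB]
        have hlast2 : (R ++ [PySem.Int.toChars (k : Int)] ++ [g]).getLast? = some g :=
          List.getLast?_concat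
        have hsum2 : pvLenSum (R ++ [PySem.Int.toChars (k : Int)] ++ [g])
            = (t + unitLen c (k : Int)) + (g.length : Int) := by
          rw [pvLenSum_concat, pvLenSum_concat, hsum]
          simp [unitLen, h1k]
          ring
        have := ih _ g 1 (t + unitLen c (k : Int)) (by omega) hlast2 hsum2
        exact_mod_cast this
      · have hk1 : k = 1 := by omega
        subst hk1
        have hA : solutionStep (R, pvSameOf c 1, pvCountOf 1) g
            = (R ++ [g], pvSameOf g 1, pvCountOf 1) := by
          simp only [solutionStep, if_neg hne]
          rw [if_neg (by simp [pvSameOf, PySem.Dict.size, PySem.Dict.empty])]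
          simp [pvSameOf, pvCountOf]
        rw [hA, hB]
        have hlast2 : (R ++ [g]).getLast? = some g := List.getLast?_concat
        have hsum2 : pvLenSum (R ++ [g]) = (t + unitLen c 1) + (g.length : Int) := by
          rw [pvLenSum_concat, hsum]
          simp [unitLen]
        have := ih _ g 1 (t + unitLen c 1) (by omega) hlast2 hsum2
        exact_mod_cast this

lemma pvLenFor_eq (cs : List Char) (n : Int) (hn : 1 ≤ n) :
    solutionLenFor cs n = pvRleLenFor cs n := by
  obtain ⟨m, rfl⟩ : ∃ m : Nat, n = (m : Int) := ⟨n.toNat, by omega⟩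
  have hm : 0 < m := by exact_mod_cast hn
  have hA : solutionLenFor cs (m : Int)
      = pvFinA ((pvChunks m cs).foldl solutionStep ([], PySem.Dict.empty, 0)) := by
    rw [← pvChunks_eq m hm cs, List.foldl_map]
    rfl
  have hB : pvRleLenFor cs (m : Int)
      = pvFinB ((pvChunks m cs).foldl pvRleStep (0, 0, none)) := by
    rw [← pvChunks_eq m hm cs, List.foldl_map]
    rfl
  rw [hA, hB]
  cases hch : pvChunks m cs with
  | nil =>
    simp [pvFinA, pvFinB, PySem.Dict.size, PySem.Dict.empty, PySem.Chars.join_nil]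
  | cons g0 gs =>
    rw [List.foldl_cons, List.foldl_cons]
    have hA0 : solutionStep ([], PySem.Dict.empty, 0) g0 = ([g0], pvSameOf g0 1, pvCountOf 1) := by
      simp only [solutionStep]
      rw [if_neg (by simp)]
      rw [if_neg (by simp [PySem.Dict.size, PySem.Dict.empty])]
      simp [pvSameOf, pvCountOf]
    have hB0 : pvRleStep (0, 0, none) g0 = (0, ((1:Nat) : Int), some g0) := by
      simp [pvRleStep]
    rw [hA0, hB0]
    exact pvRun_inv gs [g0] g0 1 0 (by omega) (by simp) (by simp [pvLenSum])

-- the RLE fold from a mid-run state, expressed by run splitting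
lemma pvBridge (gs : List (List Char)) :
    ∀ (c : List Char) (k : Nat) (t : Int), 1 ≤ k →
    pvFinB (gs.foldl pvRleStep (t, (k : Int), some c))
      = t + unitLen c ((k : Int) + (leadCount c gs : Int)) + pvRleVal (dropRun c gs) := by
  induction gs with
  | nil =>
    intro c k t hk
    simp [pvFinB, leadCount, dropRun, pvRleVal]
  | cons g gs ih =>
    intro c k t hk
    rw [List.foldl_cons]
    by_cases hg : g = c
    · subst hg
      have hB : pvRleStep (t, (k : Int), some g) g = (t, (k : Int) + 1, some g) := by
        simp [pvRleStep]
      have hl : leadCount g (g :: gs) = leadCount g gs + 1 := by simp [leadCount]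
      have hr : dropRun g (g :: gs) = dropRun g gs := by simp [dropRun]
      have hcast : (k : Int) + 1 = ((k + 1 : Nat) : Int) := by push_cast; ring
      rw [hB, hcast, ih g (k + 1) t (by omega), hl, hr]
      have harg : ((k + 1 : Nat) : Int) + (leadCount g gs : Int)
          = (k : Int) + ((leadCount g gs + 1 : Nat) : Int) := by push_cast; ring
      rw [harg]
    · have hB : pvRleStep (t, (k : Int), some c) g
          = (t + unitLen c (k : Int), 1, some g) := by
        simp only [pvRleStep]
        rw [if_neg (by simp; exact fun h => hg h.symm)]
      rw [hB]
      have h1 := ih g 1 (t + unitLen c (k : Int)) (by omega)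
      have h2 := ih g 1 0 (by omega)
      have hval : pvRleVal (g :: gs)
          = unitLen g (1 + (leadCount g gs : Int)) + pvRleVal (dropRun g gs) := by
        rw [pvRleVal, List.foldl_cons]
        have hB0 : pvRleStep (0, 0, none) g = (0, ((1:Nat) : Int), some g) := by
          simp [pvRleStep]
        rw [hB0, h2]
        push_cast
        ring
      have hlc : leadCount c (g :: gs) = 0 := by simp [leadCount, hg]
      have hdr : dropRun c (g :: gs) = g :: gs := by simp [dropRun, hg]
      rw [show ((1 : Nat) : Int) = (1 : Int) by norm_num] at h1
      rw [h1, hlc, hdr, hval]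
      push_cast
      ring

lemma pvRleVal_cons (g : List Char) (gs : List (List Char)) :
    pvRleVal (g :: gs) = unitLen g (1 + (leadCount g gs : Int)) + pvRleVal (dropRun g gs) := by
  rw [pvRleVal, List.foldl_cons]
  have hB0 : pvRleStep (0, 0, none) g = (0, ((1:Nat) : Int), some g) := by
    simp [pvRleStep]
  rw [hB0, pvBridge gs g 1 0 (by omega)]
  push_cast
  ring

lemma pvCountRunIdx_eq (gs : List (List Char)) :
    ∀ (chunks : List (List Char)) (c : List Char) (j k : Nat),
    chunks[j]? = some c → chunks.drop k = gs →
    countRunIdx chunks j k = k + leadCount c gs := by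
  induction gs with
  | nil =>
    intro chunks c j k hj hd
    have hk : chunks.length ≤ k := List.drop_eq_nil_iff.mp hd
    rw [countRunIdx, dif_neg (fun h => absurd h.1 (by omega))]
    simp [leadCount]
  | cons g gs ih =>
    intro chunks c j k hj hd
    have hk0 : chunks[k]? = some g := by
      have : (chunks.drop k)[0]? = some g := by rw [hd]; rfl
      rwa [List.getElem?_drop, Nat.add_zero] at this
    have hklt : k < chunks.length := (List.getElem?_eq_some_iff.mp hk0).1
    have hd1 : chunks.drop (k + 1) = gs := by
      have : (chunks.drop k).drop 1 = gs := by rw [hd]; rfl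
      rwa [List.drop_drop] at this
    by_cases hg : g = c
    · subst hg
      rw [countRunIdx, dif_pos ⟨hklt, by rw [hk0, hj]⟩]
      rw [ih chunks g j (k + 1) hj hd1]
      have hl : leadCount g (g :: gs) = leadCount g gs + 1 := by simp [leadCount]
      rw [hl]
      omega
    · rw [countRunIdx, dif_neg (by
        intro h
        rw [hk0, hj] at h
        exact hg (Option.some.inj h.2))]
      simp [leadCount, hg]

lemma pvDrop_lead (gs : List (List Char)) :
    ∀ (chunks : List (List Char)) (c : List Char) (k : Nat),
    chunks.drop k = gs → chunks.drop (k + leadCount c gs) = dropRun c gs := by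
  induction gs with
  | nil =>
    intro chunks c k hd
    simp [leadCount, dropRun, hd]
  | cons g gs ih =>
    intro chunks c k hd
    have hd1 : chunks.drop (k + 1) = gs := by
      have : (chunks.drop k).drop 1 = gs := by rw [hd]; rfl
      rwa [List.drop_drop] at this
    by_cases hg : g = c
    · subst hg
      have hl : leadCount g (g :: gs) = leadCount g gs + 1 := by simp [leadCount]
      have hr : dropRun g (g :: gs) = dropRun g gs := by simp [dropRun]
      rw [hl, hr, show k + (leadCount g gs + 1) = (k + 1) + leadCount g gs by omega]
      exact ih chunks g (k + 1) hd1
    · simp only [leadCount, dropRun, if_neg hg]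
      rw [Nat.add_zero, hd]

-- zeta-reduced unfolding of sumRuns at an in-range pointer
lemma sumRuns_pos (chunks : List (List Char)) (j : Nat) (h : j < chunks.length) :
    sumRuns chunks j = ((chunks[j]'h).length : Int)
      + (if 1 < ((countRunIdx chunks j (j + 1) : Int) - (j : Int))
          then ((PySem.Int.toChars ((countRunIdx chunks j (j + 1) : Int) - (j : Int))).length : Int)
          else 0)
      + sumRuns chunks (countRunIdx chunks j (j + 1)) := by
  rw [sumRuns, dif_pos h]

-- B's pointer loop computes the RLE value of the suffix
lemma pvSumRuns_eq (chunks : List (List Char)) (j : Nat) :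
    sumRuns chunks j = pvRleVal (chunks.drop j) := by
  by_cases hj : j < chunks.length
  · have hsplit : chunks.drop j = chunks[j] :: chunks.drop (j + 1) :=
      List.drop_eq_getElem_cons hj
    have hjopt : chunks[j]? = some chunks[j] := List.getElem?_eq_getElem hj
    have hk : countRunIdx chunks j (j + 1)
        = (j + 1) + leadCount chunks[j] (chunks.drop (j + 1)) :=
      pvCountRunIdx_eq (chunks.drop (j + 1)) chunks chunks[j] j (j + 1) hjopt rfl
    have hd : chunks.drop ((j + 1) + leadCount chunks[j] (chunks.drop (j + 1)))
        = dropRun chunks[j] (chunks.drop (j + 1)) :=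
      pvDrop_lead (chunks.drop (j + 1)) chunks chunks[j] (j + 1) rfl
    have hrec : sumRuns chunks (countRunIdx chunks j (j + 1))
        = pvRleVal (chunks.drop (countRunIdx chunks j (j + 1))) :=
      pvSumRuns_eq chunks (countRunIdx chunks j (j + 1))
    rw [sumRuns_pos chunks j hj, hrec, hk, hd, hsplit, pvRleVal_cons]
    have hrun : ((((j + 1) + leadCount chunks[j] (chunks.drop (j + 1)) : Nat)) : Int) - (j : Int)
        = 1 + (leadCount chunks[j] (chunks.drop (j + 1)) : Int) := by
      push_cast
      ring
    rw [hrun]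
    simp only [unitLen]
  · rw [sumRuns, dif_neg hj]
    rw [List.drop_eq_nil_of_le (by omega)]
    simp [pvRleVal, pvFinB]
termination_by chunks.length - j
decreasing_by have := countRunIdx_ge chunks j (j + 1); omega

-- glue: B's per-n total equals the RLE value of the chunk list
lemma pvAltLenFor_eq (cs : List Char) (n : Int) :
    sumRuns ((PySem.List.pyRange 0 (cs.length : Int) n).map
      (fun i => PySem.List.slice cs (some i) (some (i + n)))) 0 = pvRleLenFor cs n := by
  rw [pvSumRuns_eq, List.drop_zero, pvRleVal, pvRleLenFor, List.foldl_map]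

lemma pvTail_val (cs : List Char) (n : Int) (h1 : 1 ≤ n) (hL : 1 ≤ cs.length)
    (h2 : (cs.length : Int) < 2 * n) : pvRleLenFor cs n = (cs.length : Int) := by
  obtain ⟨m, rfl⟩ : ∃ m : Nat, n = (m : Int) := ⟨n.toNat, by omega⟩
  have hm : 0 < m := by exact_mod_cast h1
  have hm2 : cs.length < 2 * m := by exact_mod_cast h2
  have hB : pvRleLenFor cs (m : Int)
      = pvFinB ((pvChunks m cs).foldl pvRleStep (0, 0, none)) := by
    rw [pvRleLenFor, ← pvChunks_eq m hm cs, List.foldl_map]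
  rw [hB]
  have hne : cs ≠ [] := by intro h; rw [h] at hL; simp at hL
  by_cases hml : cs.length ≤ m
  · have hch : pvChunks m cs = [cs] := by
      rw [pvChunks, dif_neg (by simp [hne, hm.ne'])]
      rw [List.take_of_length_le hml, List.drop_eq_nil_of_le hml]
      rw [pvChunks, dif_pos (Or.inl rfl)]
    rw [hch]
    simp [pvRleStep, pvFinB, unitLen]
  · push Not at hml
    have hch : pvChunks m cs = [cs.take m, cs.drop m] := by
      rw [pvChunks, dif_neg (by simp [hne, hm.ne'])]
      rw [pvChunks, dif_neg (by
        push Not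
        refine ⟨?_, hm.ne'⟩
        intro h
        have := congrArg List.length h
        simp at this
        omega)]
      rw [pvChunks]
      rw [dif_pos (Or.inl (by rw [List.drop_drop]; exact List.drop_eq_nil_of_le (by omega)))]
      congr 1
      rw [List.take_of_length_le (by simp; omega)]
    rw [hch]
    have htd : cs.take m ≠ cs.drop m := by
      intro h
      have := congrArg List.length h
      simp at this
      omega
    rw [List.foldl_cons, List.foldl_cons]
    have hs1 : pvRleStep (0, 0, none) (cs.take m) = (0, 1, some (cs.take m)) := by
      simp [pvRleStep]
    have hs2 : pvRleStep (0, 1, some (cs.take m)) (cs.drop m)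
        = (0 + unitLen (cs.take m) 1, 1, some (cs.drop m)) := by
      simp only [pvRleStep]
      rw [if_neg (by simp [htd])]
    rw [hs1, hs2, List.foldl_nil]
    have htl : (cs.take m).length = m := by simp; omega
    have hdl : (cs.drop m).length = cs.length - m := by simp
    simp [pvFinB, unitLen, htl, hdl]
    omega

lemma pvFoldl_min_const (Lv : Int) (t : List Int) (h : ∀ y ∈ t, y = Lv) (a : Int)
    (ht : t ≠ []) : t.foldl min a = min a Lv := by
  match t with
  | [y] => simp [h y (by simp)]
  | y :: z :: r =>
    have hy : y = Lv := h y (by simp)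
    rw [List.foldl_cons, pvFoldl_min_const Lv (z :: r) (fun x hx => h x (by simp [hx])) _ (by simp)]
    rw [hy, min_assoc, min_self]

lemma pvFoldl_min_append (Lv : Int) (ys : List Int) (hys : ys ≠ []) (hall : ∀ y ∈ ys, y = Lv) :
    ∀ (xs : List Int) (a : Int), (xs ++ ys).foldl min a = xs.foldl min (min Lv a) := by
  intro xs
  induction xs with
  | nil => intro a; simp [pvFoldl_min_const Lv ys hall a hys, min_comm]
  | cons x xs ih =>
    intro a
    simp only [List.cons_append, List.foldl_cons, ih]
    rw [min_assoc, min_comm a x, ← min_assoc]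

lemma pvMin_append (Lv : Int) (xs ys : List Int) (hys : ys ≠ []) (hall : ∀ y ∈ ys, y = Lv) :
    (PySem.List.min? (xs ++ ys) (fun x => x)).getD 0 = xs.foldl min Lv := by
  match xs with
  | [] =>
    match ys, hys with
    | y :: t, _ =>
      simp only [List.nil_append, PySem.List.min?_id_cons, Option.getD_some, List.foldl_nil]
      have hy : y = Lv := hall y (by simp)
      by_cases ht : t = []
      · simp [ht, hy]
      · rw [pvFoldl_min_const Lv t (fun x hx => hall x (by simp [hx])) y ht, hy, min_self]
  | x :: xs' =>
    rw [List.cons_append, PySem.List.min?_id_cons, Option.getD_some,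
      pvFoldl_min_append Lv ys hys hall xs' x, List.foldl_cons, min_comm Lv x]

-- ===== VERDICT (by name: the statement is the Claim_ definition above) =====
theorem solution_spec : Claim_equal_solution := by
  unfold Claim_equal_solution
  intro s _ hpre
  unfold Spec_solution
  have hcs : s.toList ≠ [] := by
    intro h
    exact hpre (String.ext (by simpa [String.toList] using h))
  have hLn : 0 < s.toList.length := List.length_pos_iff.mpr hcs
  have hq : PySem.Int.floordiv ((s.toList.length : Nat) : Int) 2
      = ((s.toList.length / 2 : Nat) : Int) := by
    exact_mod_cast PySem.Int.floordiv_natCast s.toList.length 2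
  show solution s = solution_alt s
  unfold solution solution_alt
  rw [hq]
  rw [PySem.List.pyRange_one_append 1 (((s.toList.length / 2 : Nat) : Int) + 1)
    ((s.toList.length : Int) + 1) (by omega) (by omega)]
  rw [List.map_append]
  rw [pvMin_append ((s.toList.length : Nat) : Int) _ _ ?hys ?hall]
  case hys =>
    intro h
    have := congrArg List.length h
    rw [List.length_map, PySem.List.length_pyRange_one] at this
    simp at this
    have hsl : s.toList.length = s.length := by simp
    omega
  case hall =>
    intro y hy
    rw [List.mem_map] at hy
    obtain ⟨n, hn, rfl⟩ := hy
    rw [PySem.List.mem_pyRange_one] at hn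
    obtain ⟨hn1, hn2⟩ := hn
    have h1n : (1:Int) ≤ n := by omega
    have h2n : (s.toList.length : Int) < 2 * n := by omega
    rw [pvLenFor_eq _ _ h1n]
    exact pvTail_val _ _ h1n hLn h2n
  rw [List.map_congr_left (fun n hn => pvLenFor_eq s.toList n
    (((PySem.List.mem_pyRange_one).mp hn).1))]
  rw [List.map_congr_left (fun n _ => (pvAltLenFor_eq s.toList n).symm)]
  rw [List.foldl_map]
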